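-- pv_equiv track=rewrite | github.com/Hanbooyo/Algorithm | 프로그래머스/lv1/82612. 부족한 금액 계산하기/부족한 금액 계산하기.py | solution
-- ===== SOURCE A (Python) =====
-- def solution(price, money, count):
--     hap = 0
--     for i in range(1,count+1,1):
--         hap += price*i
--     if(hap<=money):
--         return 0
--     else:
--         return hap-money
-- ===== SOURCE B (Python) =====
-- def solution(price, money, count):
--     n = max(count, 0)
--     total = price * n * (n + 1) // 2
--     return max(0, total - money)
-- ===== Notes on version B (the rewrite author's own statement) =====
-- stated objective: faster
-- what changed: Replaced the O(count) accumulation loop by the arithmetic-series closed form price*n*(n+1)//2 with n = max(count,0), and the branch by max(0, total-money).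
import Mathlib
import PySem

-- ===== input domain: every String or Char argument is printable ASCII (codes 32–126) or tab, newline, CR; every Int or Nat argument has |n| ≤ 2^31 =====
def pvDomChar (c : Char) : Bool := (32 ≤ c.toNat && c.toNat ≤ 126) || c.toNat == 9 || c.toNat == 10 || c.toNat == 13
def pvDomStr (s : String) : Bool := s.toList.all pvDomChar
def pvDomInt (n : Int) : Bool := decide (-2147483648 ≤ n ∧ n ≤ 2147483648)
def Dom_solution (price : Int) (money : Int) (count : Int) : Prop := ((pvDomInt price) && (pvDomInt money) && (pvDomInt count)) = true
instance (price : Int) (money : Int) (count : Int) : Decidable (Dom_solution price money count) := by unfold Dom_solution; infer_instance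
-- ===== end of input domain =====

-- B replaces A's O(count) accumulation loop by the O(1) arithmetic-series closed form (objective: faster).

-- ===== PORT A =====
def solution (price : Int) (money : Int) (count : Int) : Int :=
  let hap := (PySem.List.pyRange 1 (count + 1) 1).foldl (fun hap i => hap + price * i) 0
  if hap ≤ money then 0 else hap - money

-- ===== PORT B =====
def solution_alt (price : Int) (money : Int) (count : Int) : Int :=
  let n := max count 0
  let total := PySem.Int.floordiv (price * n * (n + 1)) 2
  max 0 (total - money)

-- ===== PRECONDITION & SPEC =====
def Spec_solution (price : Int) (money : Int) (count : Int) (out : Int) : Prop := out = solution_alt price money count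
instance (price : Int) (money : Int) (count : Int) (out : Int) : Decidable (Spec_solution price money count out) := by unfold Spec_solution; infer_instance

-- ===== CLAIM (what is proved, stated in full; the proofs are below) =====
def Claim_equal_solution : Prop := ∀ (price : Int) (money : Int) (count : Int), Dom_solution price money count → Spec_solution price money count (solution price money count)

-- ===== LEMMAS AND PROOFS =====

-- twice the loop's sum is price*n*(n+1)
theorem pv_sum_lemma (price : Int) (n : Nat) :
    (((List.range n).map (fun k : Nat => (1 : Int) + k)).map (fun i => price * i)).sum * 2
      = price * n * (n + 1) := by
  induction n with
  | zero => norm_num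
  | succ m ih =>
    rw [List.range_succ]
    simp only [List.map_append, List.sum_append, List.map_cons, List.map_nil, List.sum_cons,
      List.sum_nil]
    push_cast
    nlinarith [ih]

theorem solution_eq (price money count : Int) :
    solution price money count = solution_alt price money count := by
  unfold solution solution_alt
  dsimp only
  rw [PySem.List.foldl_add, PySem.List.pyRange_one,
    show (count + 1 - 1).toNat = count.toNat from by omega,
    show max count 0 = ((count.toNat : Nat) : Int) from by omega]
  generalize count.toNat = n
  have h2 := pv_sum_lemma price n
  simp only [zero_add]
  set S := ((List.range n).map (fun k : Nat => (1 : Int) + k)).map (fun i => price * i) with hS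
  rw [PySem.Int.floordiv_eq_ediv_of_pos (by norm_num : (0:Int) < 2)]
  rcases le_or_gt S.sum money with h | h
  · rw [if_pos h]; omega
  · rw [if_neg (by omega)]; omega

-- ===== VERDICT (by name: the statement is the Claim_ definition above) =====
theorem solution_spec : Claim_equal_solution := by
  intro price money count _
  exact solution_eq price money count
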